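-- pv_equiv track=rewrite | github.com/Savin97/scratch_project | test1.py | max_couple
-- ===== SOURCE A (Python) =====
-- def max_couple(l1, size):
--     if size==0:
--         return 0
--     if size == 1:
--         return l1[0]
--     sum1 = l1[0] + l1[-1]
--     l1.pop(0)
--     l1.pop(-1)
--
--     return max(sum1, max_couple(l1, size-2)) #type:ignore
-- ===== SOURCE B (Python) =====
-- def max_couple(l1, size):
--     # Single pass over opposite-end pairs (no mutation of l1, unlike A which pops it).
--     n = len(l1)
--     cands = [l1[i] + l1[n - 1 - i] for i in range(size // 2)]
--     cands.append(l1[size // 2] if size % 2 else 0)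
--     return max(cands)
-- ===== Notes on version B (the rewrite author's own statement) =====
-- stated objective: faster
-- what changed: A recursively pops both ends of the list (mutating it) and recurses size//2 times, each pop(0) shifting the whole list; B builds the opposite-index pair sums in one non-mutating comprehension over range(size//2) (plus the middle element for odd size, and A's 0 baseline for even size) and takes their max.
import Mathlib
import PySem

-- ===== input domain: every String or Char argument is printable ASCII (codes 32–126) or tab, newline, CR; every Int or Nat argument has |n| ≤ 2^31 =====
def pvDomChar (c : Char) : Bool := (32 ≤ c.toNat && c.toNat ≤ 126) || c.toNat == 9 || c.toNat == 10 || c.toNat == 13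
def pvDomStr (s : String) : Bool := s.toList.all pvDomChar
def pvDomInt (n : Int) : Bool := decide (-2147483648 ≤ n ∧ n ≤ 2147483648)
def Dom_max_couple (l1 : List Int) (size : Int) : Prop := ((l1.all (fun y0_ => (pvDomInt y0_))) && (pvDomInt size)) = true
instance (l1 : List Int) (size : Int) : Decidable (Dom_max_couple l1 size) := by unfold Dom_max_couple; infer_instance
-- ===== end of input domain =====

-- B replaces A's quadratic pop-and-recurse with a single non-mutating pass over the
-- opposite-index pairs (A pops l1 in place; the equivalence is about the return value only).

-- ===== PORT A =====
-- literal transliteration of A: recursion with l1.pop(0), l1.pop(-1)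
def max_couple (l1 : List Int) (size : Int) : Int :=
  if size = 0 then 0
  else if size = 1 then (PySem.List.pyGet? l1 0).getD 0   -- l1[0]; none (IndexError) excluded by Pre_
  else
    let sum1 := (PySem.List.pyGet? l1 0).getD 0 + (PySem.List.pyGet? l1 (-1)).getD 0
    match _h2 : PySem.List.pop? l1 0 with
    | none => 0                                           -- IndexError, excluded by Pre_
    | some (_, l2) =>
      match _h3 : PySem.List.pop? l2 (-1) with
      | none => 0                                         -- IndexError, excluded by Pre_
      | some (_, l3) => max sum1 (max_couple l3 (size - 2))
termination_by l1.length
decreasing_by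
  have a2 := PySem.List.length_of_pop?_eq_some l1 _h2
  have a3 := PySem.List.length_of_pop?_eq_some l2 _h3
  simp at a2 a3 ⊢
  omega

-- ===== PORT B =====
-- literal transliteration of B: candidate pair sums in one pass, then max of them
def max_couple_alt (l1 : List Int) (size : Int) : Int :=
  (PySem.List.max?
    (((PySem.List.pyRange 0 (PySem.Int.floordiv size 2) 1).map
        (fun i => PySem.List.pyGetD l1 i 0 + PySem.List.pyGetD l1 (PySem.List.len l1 - 1 - i) 0)) ++
      [if PySem.Int.mod size 2 ≠ 0 then PySem.List.pyGetD l1 (PySem.Int.floordiv size 2) 0 else 0])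
    (fun y => y)).getD 0

-- ===== PRECONDITION & SPEC =====
-- Pre_ excludes exactly the inputs on which A raises (IndexError when the list runs out:
-- size > len(l1) or size < 0).
def Pre_max_couple (l1 : List Int) (size : Int) : Prop := 0 ≤ size ∧ size ≤ l1.length
instance (l1 : List Int) (size : Int) : Decidable (Pre_max_couple l1 size) := by
  unfold Pre_max_couple; infer_instance
def pvWitness_max_couple : List Int × Int := ([3, -1, 4, 1, 5], 5)

def Spec_max_couple (l1 : List Int) (size : Int) (out : Int) : Prop := out = max_couple_alt l1 size
instance (l1 : List Int) (size : Int) (out : Int) : Decidable (Spec_max_couple l1 size out) := by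
  unfold Spec_max_couple; infer_instance

-- ===== CLAIM (what is proved, stated in full; the proofs are below) =====
def Claim_equal_max_couple : Prop := ∀ (l1 : List Int) (size : Int), Dom_max_couple l1 size → Pre_max_couple l1 size → Spec_max_couple l1 size (max_couple l1 size)

-- ===== LEMMAS AND PROOFS =====

-- Nat-level reading of B's candidate list and of Python's max( )
def pvMaxL : List Int → Int
  | [] => 0
  | x :: t => t.foldl max x

def pvCands (l : List Int) (s : Nat) : List Int :=
  ((List.range (s / 2)).map (fun i => l.getD i 0 + l.getD (l.length - 1 - i) 0)) ++
    [if s % 2 = 1 then l.getD (s / 2) 0 else 0]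

def pvAltN (l : List Int) (s : Nat) : Int := pvMaxL (pvCands l s)

theorem pv_foldl_max (t : List Int) (a b : Int) :
    t.foldl max (max a b) = max a (t.foldl max b) := by
  induction t generalizing b with
  | nil => rfl
  | cons c t ih =>
      simp only [List.foldl_cons]
      rw [max_assoc, ih]

theorem pv_maxL_cons (a : Int) (L : List Int) (h : L ≠ []) :
    pvMaxL (a :: L) = max a (pvMaxL L) := by
  cases L with
  | nil => exact absurd rfl h
  | cons c t => simp [pvMaxL, pv_foldl_max]

theorem pv_alt_eq (l : List Int) (s : Nat) (h : s ≤ l.length) :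
    max_couple_alt l (s : Int) = pvAltN l s := by
  unfold max_couple_alt pvAltN
  have hhalf : PySem.Int.floordiv (s : Int) 2 = ((s / 2 : Nat) : Int) := by
    exact_mod_cast PySem.Int.floordiv_natCast s 2
  have hmod : PySem.Int.mod (s : Int) 2 = ((s % 2 : Nat) : Int) := by
    exact_mod_cast PySem.Int.mod_natCast s 2
  have hlist : (PySem.List.pyRange 0 ((s / 2 : Nat) : Int) 1).map
      (fun i => PySem.List.pyGetD l i 0 + PySem.List.pyGetD l ((PySem.List.len l) - 1 - i) 0)
      = (List.range (s / 2)).map (fun i => l.getD i 0 + l.getD (l.length - 1 - i) 0) := by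
    rw [PySem.List.pyRange_zero_natCast, List.map_map]
    refine List.map_congr_left ?_
    intro i hi
    have hi' : i < s / 2 := List.mem_range.mp hi
    have hil : i < l.length := by omega
    have hidx : ((PySem.List.len l) - 1 - (i : Int)) = ((l.length - 1 - i : Nat) : Int) := by
      simp only [PySem.List.len_eq]
      omega
    simp only [Function.comp_apply, hidx, PySem.List.pyGetD_natCast]
  have hmid : (if PySem.Int.mod (s : Int) 2 ≠ 0 then
        PySem.List.pyGetD l (PySem.Int.floordiv (s : Int) 2) 0 else 0)
      = (if s % 2 = 1 then l.getD (s / 2) 0 else 0) := by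
    rw [hmod, hhalf]
    by_cases hp : s % 2 = 1
    · rw [if_pos (by exact_mod_cast by omega), if_pos hp, PySem.List.pyGetD_natCast]
    · have h0 : s % 2 = 0 := by omega
      rw [if_neg hp, if_neg (by simp [h0])]
  rw [hmid, hhalf, hlist]
  unfold pvCands
  cases hL : (List.range (s / 2)).map (fun i => l.getD i 0 + l.getD (l.length - 1 - i) 0) with
  | nil =>
      simp only [List.nil_append]
      rw [PySem.List.max?_id_cons]
      simp [pvMaxL]
  | cons c t =>
      simp only [List.cons_append]
      rw [PySem.List.max?_id_cons]
      simp [pvMaxL]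

theorem pv_altN_rec (x y : Int) (mid : List Int) (s : Nat) (h : s ≤ mid.length) :
    pvAltN (x :: (mid ++ [y])) (s + 2) = max (x + y) (pvAltN mid s) := by
  have hlen : (x :: (mid ++ [y])).length = mid.length + 2 := by simp
  have hdiv : (s + 2) / 2 = s / 2 + 1 := by omega
  have hmod : (s + 2) % 2 = s % 2 := by omega
  have hget : ∀ j : Nat, j < mid.length → (x :: (mid ++ [y])).getD (j + 1) 0 = mid.getD j 0 := by
    intro j hj
    simp only [List.getD_cons_succ]
    exact List.getD_append mid [y] 0 j hj
  have hcands : pvCands (x :: (mid ++ [y])) (s + 2) = (x + y) :: pvCands mid s := by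
    unfold pvCands
    rw [hlen, hdiv, hmod, List.range_succ_eq_map, List.map_cons, List.map_map, List.cons_append]
    congr 1
    · have h1 : (mid.length + 2 - 1 - 0) = mid.length + 1 := by omega
      rw [h1]
      simp only [List.getD_cons_zero, List.getD_cons_succ]
      have h2 : (mid ++ [y]).getD mid.length 0 = y := by
        rw [List.getD_eq_getElem _ _ (by simp)]
        simp
      rw [h2]
    · congr 1
      · refine List.map_congr_left ?_
        intro i hi
        have hi' : i < s / 2 := List.mem_range.mp hi
        have him : i < mid.length := by omega
        simp only [Function.comp_apply, Nat.succ_eq_add_one]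
        rw [hget i him]
        have h1 : mid.length + 2 - 1 - (i + 1) = (mid.length - 1 - i) + 1 := by omega
        rw [h1, hget _ (by omega)]
      · by_cases hp : s % 2 = 1
        · rw [if_pos hp, if_pos hp, hget _ (by omega)]
        · rw [if_neg hp, if_neg hp]
  rw [pvAltN, hcands, pv_maxL_cons _ _ (by unfold pvCands; simp), pvAltN]

theorem pv_A_rec (x y : Int) (mid : List Int) (s : Nat) :
    max_couple (x :: (mid ++ [y])) ((s : Int) + 2) = max (x + y) (max_couple mid (s : Int)) := by
  rw [max_couple]
  have h0 : ((s : Int) + 2) ≠ 0 := by omega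
  have h1 : ((s : Int) + 2) ≠ 1 := by omega
  rw [if_neg h0, if_neg h1]
  have hget0 : PySem.List.pyGet? (x :: (mid ++ [y])) 0 = some x := PySem.List.pyGet?_zero_cons x _
  have hgetl : PySem.List.pyGet? (x :: (mid ++ [y])) (-1) = some y := by
    rw [show x :: (mid ++ [y]) = (x :: mid) ++ [y] by simp]
    exact PySem.List.pyGet?_neg_one_append_singleton _ y
  rw [hget0, hgetl]
  simp only [Option.getD_some]
  split
  · rename_i heq
    rw [PySem.List.pop?_zero_cons] at heq
    exact absurd heq (by simp)
  · rename_i fst l2 heq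
    rw [PySem.List.pop?_zero_cons] at heq
    injection heq with heq
    cases heq
    split
    · rename_i heq2
      rw [PySem.List.pop?_last] at heq2
      exact absurd heq2 (by simp)
    · rename_i fst2 l3 heq2
      rw [PySem.List.pop?_last] at heq2
      injection heq2 with heq2
      cases heq2
      have h3 : (s : Int) + 2 - 2 = (s : Int) := by ring
      rw [h3]

theorem pv_main (s : Nat) : ∀ l1 : List Int, s ≤ l1.length →
    max_couple l1 (s : Int) = max_couple_alt l1 (s : Int) := by
  induction s using Nat.strong_induction_on with
  | _ s IH =>
    match s with
    | 0 =>
        intro l1 _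
        rw [max_couple]
        rw [pv_alt_eq l1 0 (by omega)]
        simp [pvAltN, pvCands, pvMaxL]
    | 1 =>
        intro l1 h
        cases l1 with
        | nil => simp at h
        | cons a t =>
            rw [max_couple]
            norm_num
            rw [show (1 : Int) = ((1 : Nat) : Int) by norm_num,
              pv_alt_eq _ 1 (by simp)]
            simp [pvAltN, pvCands, pvMaxL]
    | s + 2 =>
        intro l1 h
        cases hl : l1 with
        | nil => subst hl; simp at h
        | cons a t =>
          subst hl
          have ht : t ≠ [] := by
            intro he
            subst he
            simp at h
          obtain ⟨mid, y, hmy⟩ : ∃ mid y, t = mid ++ [y] :=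
            ⟨t.dropLast, t.getLast ht, (List.dropLast_append_getLast ht).symm⟩
          subst hmy
          have hmid : s ≤ mid.length := by
            simp at h
            omega
          have hcast : (((s + 2 : Nat)) : Int) = (s : Int) + 2 := by push_cast; ring
          rw [hcast, pv_A_rec, IH s (by omega) mid hmid,
              pv_alt_eq mid s hmid, ← hcast,
              pv_alt_eq (a :: (mid ++ [y])) (s + 2) (by simp; omega),
              pv_altN_rec a y mid s hmid]

-- ===== VERDICT (by name: the statement is the Claim_ definition above) =====
theorem max_couple_spec : Claim_equal_max_couple := by
  intro l1 size _ hpre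
  obtain ⟨h0, hle⟩ := hpre
  unfold Spec_max_couple
  have hs : size = ((size.toNat : Nat) : Int) := by omega
  rw [hs]
  exact pv_main size.toNat l1 (by omega)
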